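-- pv_equiv track=rewrite | github.com/vigneshv-i/Tiger-Analytics-Assignment | python-fundamentals-19-03-25.py | stone_paper_scissor_game
-- ===== SOURCE A (Python) =====
-- def stone_paper_scissor_game(plays):
--     def determine_winner(player_a, player_b):
--         if player_a == player_b:
--             return "DRAW"
--         elif ((player_a == "Stone" and player_b == "Scissor") or
--               (player_a == "Paper" and player_b == "Stone") or
--               (player_a == "Scissor" and player_b == "Paper")):
--             return "Player A wins"
--         else:
--             return "Player B wins"
--
--     results = []
--     score_a = score_b = 0
--
--     for play in plays:
--         player_a, player_b = play
--         result = determine_winner(player_a, player_b)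
--         results.append(f"{player_a} {player_b} {result}")
--
--         if result == "Player A wins":
--             score_a += 1
--         elif result == "Player B wins":
--             score_b += 1
--
--         if score_a == 5 or score_b == 5:
--             break
--
--     return '\n'.join(results)
-- ===== SOURCE B (Python) =====
-- BEATS = {("Stone", "Scissor"), ("Paper", "Stone"), ("Scissor", "Paper")}
--
--
-- def stone_paper_scissor_game(plays):
--     # Pass 1: format every round and tag who won it.
--     rounds = []
--     for a, b in plays:
--         if a == b:
--             res, flag = "DRAW", None
--         elif (a, b) in BEATS:
--             res, flag = "Player A wins", "A"
--         else:
--             res, flag = "Player B wins", "B"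
--         rounds.append((f"{a} {b} {res}", flag))
--     # Pass 2: find the 1-based cutoff where a score first reaches 5.
--     sa = sb = 0
--     cut = len(rounds)
--     for i, (_, flag) in enumerate(rounds):
--         if flag == "A":
--             sa += 1
--         elif flag == "B":
--             sb += 1
--         if sa == 5 or sb == 5:
--             cut = i + 1
--             break
--     # Pass 3: join the kept lines.
--     return "\n".join(line for line, _ in rounds[:cut])
-- ===== Notes on version B (the rewrite author's own statement) =====
-- stated objective: alternative
-- what changed: A interleaves formatting, scoring and the break in one loop; B first maps every play to a (formatted line, winner flag) pair, then scans the flags to compute the 1-based cutoff where a score first reaches 5, then joins the lines up to the cutoff.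
import Mathlib
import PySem

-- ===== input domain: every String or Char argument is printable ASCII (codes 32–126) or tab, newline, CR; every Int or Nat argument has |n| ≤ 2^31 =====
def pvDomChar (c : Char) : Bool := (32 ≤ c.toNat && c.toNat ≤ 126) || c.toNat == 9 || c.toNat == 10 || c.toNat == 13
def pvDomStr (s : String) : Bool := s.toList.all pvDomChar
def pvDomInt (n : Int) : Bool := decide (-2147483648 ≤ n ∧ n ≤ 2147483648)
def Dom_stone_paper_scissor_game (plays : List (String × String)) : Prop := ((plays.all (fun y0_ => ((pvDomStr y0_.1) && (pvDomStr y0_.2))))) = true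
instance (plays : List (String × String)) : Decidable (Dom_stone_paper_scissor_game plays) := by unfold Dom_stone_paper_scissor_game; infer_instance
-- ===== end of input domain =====

-- B replaces A's single format-score-break loop by three passes: map each play to a
-- (formatted line, winner flag) pair, scan the flags for the 1-based cutoff where a
-- score first reaches 5, then join the lines up to the cutoff (objective: alternative).

-- ===== PORT A =====
-- A's inner helper determine_winner, branch for branch
def determine_winner (player_a player_b : String) : String :=
  if player_a == player_b then "DRAW"
  else if (player_a == "Stone" && player_b == "Scissor") ||
          (player_a == "Paper" && player_b == "Stone") ||
          (player_a == "Scissor" && player_b == "Paper") then "Player A wins"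
  else "Player B wins"

-- A's for-loop with its break, carrying (results, score_a, score_b)
def spsLoopA : List (String × String) → List String → Int → Int → List String
  | [], results, _, _ => results
  | (player_a, player_b) :: rest, results, score_a, score_b =>
    let result := determine_winner player_a player_b
    let results := results ++ [player_a ++ " " ++ player_b ++ " " ++ result]
    let score_a := if result == "Player A wins" then score_a + 1 else score_a
    let score_b := if result == "Player A wins" then score_b
                   else if result == "Player B wins" then score_b + 1 else score_b
    if score_a == 5 || score_b == 5 then results
    else spsLoopA rest results score_a score_b

def stone_paper_scissor_game (plays : List (String × String)) : String :=
  PySem.Str.join "\n" (spsLoopA plays [] 0 0)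

-- ===== PORT B =====
-- B's pass 1 body: one play ↦ (formatted line, winner flag)
def spsRound (p : String × String) : String × Option String :=
  if p.1 == p.2 then (p.1 ++ " " ++ p.2 ++ " " ++ "DRAW", none)
  else if (p.1 == "Stone" && p.2 == "Scissor") ||
          (p.1 == "Paper" && p.2 == "Stone") ||
          (p.1 == "Scissor" && p.2 == "Paper") then
    (p.1 ++ " " ++ p.2 ++ " " ++ "Player A wins", some "A")
  else (p.1 ++ " " ++ p.2 ++ " " ++ "Player B wins", some "B")

-- B's pass 2: scan the flags, returning the 1-based cutoff (list length if no break)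
def spsCut : List (Option String) → Int → Int → Nat
  | [], _, _ => 0
  | flag :: rest, sa, sb =>
    let sa := if flag == some "A" then sa + 1 else sa
    let sb := if flag == some "A" then sb else if flag == some "B" then sb + 1 else sb
    if sa == 5 || sb == 5 then 1 else 1 + spsCut rest sa sb

def stone_paper_scissor_game_alt (plays : List (String × String)) : String :=
  let rounds := plays.map spsRound
  let cut := spsCut (rounds.map (·.2)) 0 0
  PySem.Str.join "\n" ((rounds.take cut).map (·.1))

-- ===== PRECONDITION & SPEC =====
def Spec_stone_paper_scissor_game (plays : List (String × String)) (out : String) : Prop := out = stone_paper_scissor_game_alt plays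
instance (plays : List (String × String)) (out : String) : Decidable (Spec_stone_paper_scissor_game plays out) := by unfold Spec_stone_paper_scissor_game; infer_instance

-- ===== CLAIM (what is proved, stated in full; the proofs are below) =====
def Claim_equal_stone_paper_scissor_game : Prop := ∀ (plays : List (String × String)), Dom_stone_paper_scissor_game plays → Spec_stone_paper_scissor_game plays (stone_paper_scissor_game plays)

-- ===== LEMMAS AND PROOFS =====

theorem spsLoopA_eq (plays : List (String × String)) :
    ∀ (acc : List String) (sa sb : Int),
      spsLoopA plays acc sa sb =
        acc ++ ((plays.map spsRound).take
          (spsCut ((plays.map spsRound).map (·.2)) sa sb)).map (·.1) := by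
  induction plays with
  | nil => intro acc sa sb; simp [spsLoopA, spsCut]
  | cons p rest ih =>
    intro acc sa sb
    obtain ⟨pa, pb⟩ := p
    by_cases h1 : (pa == pb) = true
    · simp [spsLoopA, spsCut, determine_winner, spsRound, h1]
      split_ifs with hbrk
      · simp
      · rw [ih]; simp [Nat.add_comm 1]
    · by_cases h2 : ((pa == "Stone" && pb == "Scissor") ||
          (pa == "Paper" && pb == "Stone") ||
          (pa == "Scissor" && pb == "Paper")) = true
      · simp [spsLoopA, spsCut, determine_winner, spsRound, h1, h2]
        split_ifs with hbrk
        · simp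
        · rw [ih]; simp [Nat.add_comm 1]
      · simp [spsLoopA, spsCut, determine_winner, spsRound, h1, h2]
        split_ifs with hbrk
        · simp
        · rw [ih]; simp [Nat.add_comm 1]

-- ===== VERDICT (by name: the statement is the Claim_ definition above) =====
theorem stone_paper_scissor_game_spec : Claim_equal_stone_paper_scissor_game := by
  intro plays _
  unfold Spec_stone_paper_scissor_game stone_paper_scissor_game stone_paper_scissor_game_alt
  rw [spsLoopA_eq]
  simp
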